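-- pv_equiv track=rewrite | github.com/K9Developer/Spearit | line_counter.py | _strip_gitignore_line
-- ===== SOURCE A (Python) =====
-- def _strip_gitignore_line(line: str) -> str:
--     line = line.rstrip("\n\r")
--     i = len(line)
--     while i > 0 and line[i - 1] == " ":
--         if i >= 2 and line[i - 2] == "\\":
--             break
--         i -= 1
--     return line[:i]
-- ===== SOURCE B (Python) =====
-- def _strip_gitignore_line(line: str) -> str:
--     line = line.rstrip("\n\r")
--     stripped = line.rstrip(" ")
--     if len(stripped) < len(line) and stripped.endswith("\\"):
--         return stripped + " "
--     return stripped
-- ===== Notes on version B (the rewrite author's own statement) =====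
-- stated objective: simpler
-- what changed: Replaces A's explicit downward index loop with break by a single library rstrip of trailing spaces plus one conditional that re-appends the escaped space.
import Mathlib
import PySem

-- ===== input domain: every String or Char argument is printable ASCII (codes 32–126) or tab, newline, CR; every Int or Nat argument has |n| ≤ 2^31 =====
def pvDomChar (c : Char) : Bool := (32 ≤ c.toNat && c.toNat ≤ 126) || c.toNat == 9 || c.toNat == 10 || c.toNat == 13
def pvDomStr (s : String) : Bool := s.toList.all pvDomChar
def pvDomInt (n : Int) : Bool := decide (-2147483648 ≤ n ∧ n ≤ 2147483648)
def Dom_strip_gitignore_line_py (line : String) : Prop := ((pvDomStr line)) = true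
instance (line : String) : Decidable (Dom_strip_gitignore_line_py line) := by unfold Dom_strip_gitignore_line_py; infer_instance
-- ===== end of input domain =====

-- B replaces A's explicit downward index loop (with break) by one library rstrip of trailing spaces plus a conditional re-appending the escaped space; objective: simpler.


-- ===== PORT A =====
-- hand port of Python's str.rstrip(chars) (PySem has no rstrip-with-chars): drop from the
-- right every char contained in `chars`; exact for every string and char set.
def pvRstrip (cs : List Char) (chars : List Char) : List Char :=
  (cs.reverse.dropWhile (fun c => chars.contains c)).reverse

-- the while-loop of A, recursing on i (Python's i is the argument itself)
def pvALoop (cs : List Char) : Nat → Nat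
  | 0 => 0
  | i + 1 =>
    if cs[i]? = some ' ' then
      if i + 1 ≥ 2 ∧ cs[i - 1]? = some '\\' then i + 1
      else pvALoop cs i
    else i + 1

def strip_gitignore_line_py (line : String) : String :=
  let cs := pvRstrip line.toList ['\n', '\r']
  String.ofList (cs.take (pvALoop cs cs.length))

-- ===== PORT B =====
def strip_gitignore_line_py_alt (line : String) : String :=
  let cs := pvRstrip line.toList ['\n', '\r']
  let stripped := pvRstrip cs [' ']
  if stripped.length < cs.length ∧ PySem.Chars.endswith stripped ['\\'] = true then
    String.ofList (stripped ++ [' '])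
  else
    String.ofList stripped

-- ===== PRECONDITION & SPEC =====
def Spec_strip_gitignore_line_py (line : String) (out : String) : Prop := out = strip_gitignore_line_py_alt line
instance (line : String) (out : String) : Decidable (Spec_strip_gitignore_line_py line out) := by unfold Spec_strip_gitignore_line_py; infer_instance

-- ===== CLAIM (what is proved, stated in full; the proofs are below) =====
def Claim_equal_strip_gitignore_line_py : Prop := ∀ (line : String), Dom_strip_gitignore_line_py line → Spec_strip_gitignore_line_py line (strip_gitignore_line_py line)

-- ===== LEMMAS AND PROOFS =====

-- pvALoop cs i only reads indices below i
lemma pvALoop_congr (cs cs' : List Char) (i : Nat) (h : ∀ j < i, cs[j]? = cs'[j]?) :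
    pvALoop cs i = pvALoop cs' i := by
  induction i with
  | zero => rfl
  | succ i ih =>
    have h1 : cs[i]? = cs'[i]? := h i (Nat.lt_succ_self i)
    have h2 : cs[i - 1]? = cs'[i - 1]? := h (i - 1) (by omega)
    simp only [pvALoop, h1, h2]
    split
    · split
      · rfl
      · exact ih (fun j hj => h j (by omega))
    · rfl

-- the loop's value on a string decomposed as pre ++ spaces, pre not ending in a space
lemma pvALoop_spec (pre : List Char) (k : Nat) (hpre : pre.getLast? ≠ some ' ') :
    pvALoop (pre ++ List.replicate k ' ') (pre.length + k) =
      if k ≠ 0 ∧ pre.getLast? = some '\\' then pre.length + 1 else pre.length := by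
  induction k with
  | zero =>
    simp only [List.replicate, List.append_nil, Nat.add_zero, ne_eq, not_true_eq_false,
      false_and, if_false]
    cases hp : pre.getLast? with
    | none =>
      have : pre = [] := List.getLast?_eq_none_iff.mp hp
      subst this; rfl
    | some c =>
      have hlen : pre.length ≠ 0 := by
        intro h0
        rw [List.eq_nil_of_length_eq_zero h0] at hp; simp at hp
      obtain ⟨i, hi⟩ : ∃ i, pre.length = i + 1 := ⟨pre.length - 1, by omega⟩
      have hidx : pre[i]? = some c := by
        rw [← hp, List.getLast?_eq_getElem?]; congr 1; omega
      have hc : c ≠ ' ' := by rw [hp] at hpre; simp at hpre; exact hpre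
      rw [hi]
      simp only [pvALoop, hidx]
      simp [hc]
  | succ k ih =>
    have hlen : (pre ++ List.replicate (k + 1) ' ').length = pre.length + k + 1 := by
      simp [List.length_append]; omega
    have hidx : (pre ++ List.replicate (k + 1) ' ')[pre.length + k]? = some ' ' := by
      rw [List.getElem?_append_right (by omega)]
      simp
    rw [show pre.length + (k + 1) = (pre.length + k) + 1 from rfl]
    simp only [pvALoop, hidx]
    rw [if_pos trivial]
    by_cases hk : k = 0
    · subst hk
      -- index pre.length + 0 - 1 = pre.length - 1, the last char of pre (or cs[0] when pre = [])
      by_cases hp : pre.getLast? = some '\\'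
      · have hlen0 : pre.length ≠ 0 := by
          intro h0; rw [List.eq_nil_of_length_eq_zero h0] at hp; simp at hp
        have hidx2 : (pre ++ List.replicate 1 ' ')[pre.length + 0 - 1]? = some '\\' := by
          rw [List.getElem?_append_left (by omega)]
          rw [← hp, List.getLast?_eq_getElem?]; congr 1
        rw [if_pos ⟨by omega, hidx2⟩]
        simp [hp]
      · have hcond : ¬ (pre.length + 0 + 1 ≥ 2 ∧
            (pre ++ List.replicate 1 ' ')[pre.length + 0 - 1]? = some '\\') := by
          rintro ⟨hge, hidx2⟩
          have hlen0 : pre.length ≠ 0 := by omega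
          rw [List.getElem?_append_left (by omega)] at hidx2
          apply hp
          rw [List.getLast?_eq_getElem?]
          rw [← hidx2]; congr 1
        rw [if_neg hcond]
        have hcg : pvALoop (pre ++ List.replicate 1 ' ') (pre.length + 0) =
            pvALoop (pre ++ List.replicate 0 ' ') (pre.length + 0) := by
          apply pvALoop_congr
          intro j hj
          rw [List.getElem?_append_left (by omega), List.getElem?_append_left (by omega)]
        rw [hcg, ih]
        simp [hp]
    · -- k > 0: the char below is a space, no break
      have hidx2 : (pre ++ List.replicate (k + 1) ' ')[pre.length + k - 1]? = some ' ' := by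
        rw [List.getElem?_append_right (by omega)]
        simp [List.getElem?_replicate]
        omega
      have hcond : ¬ (pre.length + k + 1 ≥ 2 ∧
          (pre ++ List.replicate (k + 1) ' ')[pre.length + k - 1]? = some '\\') := by
        rintro ⟨-, h2⟩; rw [hidx2] at h2; simp at h2
      rw [if_neg hcond]
      have hcg : pvALoop (pre ++ List.replicate (k + 1) ' ') (pre.length + k) =
          pvALoop (pre ++ List.replicate k ' ') (pre.length + k) := by
        apply pvALoop_congr
        intro j hj
        by_cases hjp : j < pre.length
        · rw [List.getElem?_append_left hjp, List.getElem?_append_left hjp]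
        · rw [List.getElem?_append_right (by omega), List.getElem?_append_right (by omega)]
          have h1 : j - pre.length < k := by omega
          simp [h1, Nat.lt_succ_of_lt h1]
      rw [hcg, ih]
      simp [hk]

-- decomposition of any char list into (rstrip-space result) ++ spaces
lemma rstrip_space_decomp (cs : List Char) :
    cs = pvRstrip cs [' '] ++ List.replicate (cs.reverse.takeWhile (fun c => ([' '] : List Char).contains c)).length ' ' := by
  unfold pvRstrip
  conv_lhs => rw [← cs.reverse_reverse,
    ← List.takeWhile_append_dropWhile (p := fun c => ([' '] : List Char).contains c) (l := cs.reverse)]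
  rw [List.reverse_append]
  congr 1
  have hall : ∀ c ∈ cs.reverse.takeWhile (fun c => ([' '] : List Char).contains c), c = ' ' := by
    intro c hc
    simpa using List.mem_takeWhile_imp hc
  have hrep : cs.reverse.takeWhile (fun c => ([' '] : List Char).contains c) =
      List.replicate (cs.reverse.takeWhile (fun c => ([' '] : List Char).contains c)).length ' ' :=
    List.eq_replicate_iff.mpr ⟨rfl, hall⟩
  conv_lhs => rw [hrep]
  rw [List.reverse_replicate]

lemma rstrip_space_getLast (cs : List Char) : (pvRstrip cs [' ']).getLast? ≠ some ' ' := by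
  unfold pvRstrip
  intro h
  rw [List.getLast?_reverse] at h
  have := List.head?_dropWhile_not (fun c => ([' '] : List Char).contains c) cs.reverse
  rw [h] at this
  simp at this

lemma take_succ_append_replicate (pre : List Char) (k : Nat) (hk : k ≠ 0) :
    List.take (pre.length + 1) (pre ++ List.replicate k ' ') = pre ++ [' '] := by
  obtain ⟨k', rfl⟩ : ∃ k', k = k' + 1 := ⟨k - 1, by omega⟩
  rw [show List.replicate (k' + 1) ' ' = ' ' :: List.replicate k' ' ' from rfl, List.take_append]
  simp

lemma endswith_backslash (cs : List Char) :
    PySem.Chars.endswith cs ['\\'] = true ↔ cs.getLast? = some '\\' := by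
  rw [PySem.Chars.endswith_iff]
  constructor
  · rintro ⟨t, rfl⟩; simp
  · intro h
    cases hcs : cs.reverse with
    | nil => simp [List.reverse_eq_nil_iff.mp hcs] at h
    | cons x t =>
      have : cs = t.reverse ++ [x] := by
        rw [← cs.reverse_reverse, hcs]; simp
      rw [this] at h ⊢
      simp at h
      exact ⟨t.reverse, by rw [h]⟩

-- ===== VERDICT (by name: the statement is the Claim_ definition above) =====
theorem strip_gitignore_line_py_spec : Claim_equal_strip_gitignore_line_py := by
  intro line _
  unfold Spec_strip_gitignore_line_py strip_gitignore_line_py strip_gitignore_line_py_alt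
  dsimp only
  set cs := pvRstrip line.toList ['\n', '\r'] with hcs
  set pre := pvRstrip cs [' '] with hpre
  set k := (cs.reverse.takeWhile (fun c => ([' '] : List Char).contains c)).length with hk
  have hdec : cs = pre ++ List.replicate k ' ' := rstrip_space_decomp cs
  have hlast : pre.getLast? ≠ some ' ' := rstrip_space_getLast cs
  have hlen : cs.length = pre.length + k := by rw [hdec]; simp
  have hloop : pvALoop cs cs.length =
      if k ≠ 0 ∧ pre.getLast? = some '\\' then pre.length + 1 else pre.length := by
    rw [hlen]; conv_lhs => rw [hdec]
    exact pvALoop_spec pre k hlast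
  rw [hloop]
  by_cases hc : k ≠ 0 ∧ pre.getLast? = some '\\'
  · rw [if_pos hc]
    rw [if_pos ⟨by omega, (endswith_backslash pre).mpr hc.2⟩]
    congr 1
    conv_lhs => rw [hdec]
    exact take_succ_append_replicate pre k hc.1
  · rw [if_neg hc]
    have hc' : ¬ (pre.length < cs.length ∧ PySem.Chars.endswith pre ['\\'] = true) := by
      rintro ⟨h1, h2⟩
      exact hc ⟨by omega, (endswith_backslash pre).mp h2⟩
    rw [if_neg hc']
    congr 1
    conv_lhs => rw [hdec]
    rw [List.take_append_of_le_length (le_refl _)]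
    simp
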